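-- pv_equiv track=rewrite | github.com/MatrixFounder/Universal-skills | skills/xlsx/scripts/xlsx2md/headers.py | compute_colspan_spans
-- ===== SOURCE A (Python) =====
-- def compute_colspan_spans(header_rows: list[list[str]]) -> list[list[int]]:
--     """Compute ``colspan`` for each cell in each header row.
--
--     Returns a parallel list of lists with the same shape as
--     ``header_rows``. Each value is the column span for that cell:
--
--     - ``>= 1``: the ``<th>`` should emit with this colspan (omit the
--       ``colspan`` attribute if value is 1).
--     - ``0``: this position is covered by an earlier ``<th>`` with
--       colspan > 1 in the same row — emit nothing (sentinel).
--
--     Leaf row (last row): always ``1`` for each position.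
--     Non-leaf rows: consecutive positions that share an identical
--     **prefix path** (values at row 0 through row i-1 are all equal)
--     AND have the same value at row i are merged into one span.
--
--     Parameters
--     ----------
--     header_rows:
--         Output of :func:`split_headers_to_rows`.
--
--     Returns
--     -------
--     list[list[int]]
--         Parallel spans array with same shape as ``header_rows``.
--
--     Example::
--
--         compute_colspan_spans([["2026 plan", "2026 plan"], ["Q1", "Q2"]])
--         # => [[2, 0], [1, 1]]
--         # Top band: "2026 plan" spans 2 columns; second position suppressed.
--         # Leaf row: each column spans 1 (always).
--     """
--     if not header_rows:
--         return []
--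
--     n_rows = len(header_rows)
--     n_cols = len(header_rows[0]) if header_rows else 0
--
--     if n_cols == 0:
--         return [[] for _ in header_rows]
--
--     spans: list[list[int]] = [[1] * n_cols for _ in range(n_rows)]
--
--     leaf_idx = n_rows - 1
--
--     for row_idx in range(n_rows):
--         if row_idx == leaf_idx:
--             # Leaf row: always colspan=1 for each position.
--             spans[row_idx] = [1] * n_cols
--             continue
--
--         # For non-leaf rows: compute spans using prefix path grouping.
--         # Two positions j and k (k > j) can be merged at row_idx iff:
--         #   - For all level r in 0..row_idx-1: header_rows[r][j] == header_rows[r][k]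
--         #   - header_rows[row_idx][j] == header_rows[row_idx][k]
--         #
--         # Algorithm: scan left-to-right; for each start of a run,
--         # count consecutive positions with same prefix path.
--
--         result_row = [0] * n_cols  # default: suppressed (0)
--         j = 0
--         while j < n_cols:
--             # Determine the prefix path for position j up to row_idx (inclusive).
--             path_j = tuple(header_rows[r][j] for r in range(row_idx + 1))
--
--             # Count how far this run extends.
--             run_end = j + 1
--             while run_end < n_cols:
--                 path_k = tuple(header_rows[r][run_end] for r in range(row_idx + 1))
--                 if path_k != path_j:
--                     break
--                 run_end += 1
--
--             run_length = run_end - j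
--             result_row[j] = run_length  # anchor: emit with colspan=run_length
--             for k in range(j + 1, run_end):
--                 result_row[k] = 0  # suppressed: covered by anchor
--
--             j = run_end
--
--         spans[row_idx] = result_row
--
--     return spans
-- ===== SOURCE B (Python) =====
-- def compute_colspan_spans(header_rows: list[list[str]]) -> list[list[int]]:
--     """Same result as A, computed via per-adjacent-column first-differing-row.
--
--     For each adjacent column pair (j, j+1) we precompute the first row index
--     (among the non-leaf rows) where the two columns differ.  A boundary exists
--     at row i between columns j and j+1 iff that first-differing row is <= i,
--     so each non-leaf row is produced in one linear scan over the boundaries.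
--     """
--     if not header_rows:
--         return []
--
--     n_rows = len(header_rows)
--     n_cols = len(header_rows[0])
--
--     if n_cols == 0:
--         return [[] for _ in header_rows]
--
--     m = n_rows - 1  # number of non-leaf rows; only these rows are ever compared
--
--     # firstdiff[j]: first r < m with header_rows[r][j] != header_rows[r][j+1], else m
--     firstdiff = []
--     for j in range(n_cols - 1):
--         fd = m
--         for r in range(m):
--             if header_rows[r][j] != header_rows[r][j + 1]:
--                 fd = r
--                 break
--         firstdiff.append(fd)
--
--     out = []
--     for i in range(m):
--         row = [0] * n_cols
--         anchor = 0
--         for j in range(n_cols - 1):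
--             if firstdiff[j] <= i:
--                 row[anchor] = j + 1 - anchor
--                 anchor = j + 1
--         row[anchor] = n_cols - anchor
--         out.append(row)
--     out.append([1] * n_cols)
--     return out
-- ===== Notes on version B (the rewrite author's own statement) =====
-- stated objective: faster
-- what changed: Instead of rebuilding and comparing full prefix-path tuples for every column at every row (A), B precomputes for each adjacent column pair the first non-leaf row where the two columns differ, then emits each row's spans in one linear scan over these boundary indices (boundary at row i iff firstdiff <= i).
import Mathlib
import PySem

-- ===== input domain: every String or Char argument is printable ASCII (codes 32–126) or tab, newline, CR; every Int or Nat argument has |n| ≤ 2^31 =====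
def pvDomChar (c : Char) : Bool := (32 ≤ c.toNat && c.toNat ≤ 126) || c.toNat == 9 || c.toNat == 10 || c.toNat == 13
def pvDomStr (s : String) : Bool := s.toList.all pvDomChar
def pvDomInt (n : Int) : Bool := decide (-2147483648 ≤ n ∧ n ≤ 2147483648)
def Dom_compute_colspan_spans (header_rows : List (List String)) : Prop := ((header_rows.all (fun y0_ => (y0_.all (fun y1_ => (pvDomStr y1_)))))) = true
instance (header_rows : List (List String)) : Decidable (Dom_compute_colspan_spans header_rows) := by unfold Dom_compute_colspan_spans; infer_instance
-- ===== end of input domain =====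

-- B replaces A's repeated full prefix-path tuple comparisons (O(R^2*C)) by precomputed
-- per-adjacent-column first-differing-row indices and one linear boundary scan per row (O(R*C)).

-- header_rows[r][j] (in range on every admitted input; total helper used by both ports)
def pvCell (hr : List (List String)) (r j : Nat) : String := (hr.getD r []).getD j ""

-- ===== PORT A =====
-- tuple(header_rows[r][j] for r in range(s))   (s = row_idx + 1)
def pathA (hr : List (List String)) (s j : Nat) : List String :=
  (List.range s).map (fun r => pvCell hr r j)

-- the inner `while run_end < n_cols: … break … run_end += 1` loop
def runEndA (hr : List (List String)) (s n : Nat) (pj : List String) (k : Nat) : Nat :=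
  if _h : k < n then
    if pathA hr s k ≠ pj then k else runEndA hr s n pj (k + 1)
  else k
termination_by n - k

-- termination helper for buildRowA (cited in its decreasing_by)
lemma runEndA_ge (hr : List (List String)) (s n : Nat) (pj : List String) (k : Nat) :
    k ≤ runEndA hr s n pj k := by
  rw [runEndA]
  split_ifs with h1 h2
  · exact Nat.le_refl k
  · exact Nat.le_trans (Nat.le_succ k) (runEndA_ge hr s n pj (k + 1))
  · exact Nat.le_refl k
termination_by n - k
decreasing_by omega

-- the outer `while j < n_cols` loop building result_row (starts as [0]*n_cols)
def buildRowA (hr : List (List String)) (s n : Nat) (j : Nat) (acc : List Int) : List Int :=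
  if _h : j < n then
    let re := runEndA hr s n (pathA hr s j) (j + 1)
    let acc1 := acc.set j ((re - j : Nat) : Int)
    -- `for k in range(j+1, run_end): result_row[k] = 0`
    let acc2 := (List.range' (j + 1) (re - (j + 1))).foldl (fun a k => a.set k (0 : Int)) acc1
    buildRowA hr s n re acc2
  else acc
termination_by n - j
decreasing_by
  have := runEndA_ge hr s n (pathA hr s j) (j + 1)
  omega

def compute_colspan_spans (header_rows : List (List String)) : List (List Int) :=
  if header_rows = [] then []
  else
    let n_rows := header_rows.length
    let n_cols := (header_rows.getD 0 []).length
    if n_cols = 0 then header_rows.map (fun _ => [])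
    else
      (List.range n_rows).map (fun row_idx =>
        if row_idx = n_rows - 1 then List.replicate n_cols (1 : Int)
        else buildRowA header_rows (row_idx + 1) n_cols 0 (List.replicate n_cols (0 : Int)))

-- ===== PORT B =====
-- `fd = m; for r in range(m): if header_rows[r][j] != header_rows[r][j+1]: fd = r; break`
def fdLoop (hr : List (List String)) (j m r : Nat) : Nat :=
  if _h : r < m then
    if pvCell hr r j ≠ pvCell hr r (j + 1) then r else fdLoop hr j m (r + 1)
  else m
termination_by m - r

-- one non-leaf output row: scan the boundary indices left to right, carrying (row, anchor)
def rowB (fd : List Nat) (n i : Nat) : List Int :=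
  let st := (List.range (n - 1)).foldl
    (fun (st : List Int × Nat) j =>
      if fd.getD j 0 ≤ i then (st.1.set st.2 (((j + 1) - st.2 : Nat) : Int), j + 1) else st)
    (List.replicate n (0 : Int), 0)
  st.1.set st.2 ((n - st.2 : Nat) : Int)

def compute_colspan_spans_alt (header_rows : List (List String)) : List (List Int) :=
  if header_rows = [] then []
  else
    let n_rows := header_rows.length
    let n_cols := (header_rows.headD []).length
    if n_cols = 0 then header_rows.map (fun _ => [])
    else
      let m := n_rows - 1
      let fd := (List.range (n_cols - 1)).map (fun j => fdLoop header_rows j m 0)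
      ((List.range m).map (fun i => rowB fd n_cols i)) ++ [List.replicate n_cols (1 : Int)]

-- ===== PRECONDITION & SPEC =====
-- Python A raises IndexError exactly when some NON-LEAF row is shorter than row 0
-- (the leaf row is never indexed); Pre_ excludes exactly those inputs.
def Pre_compute_colspan_spans (header_rows : List (List String)) : Prop :=
  ∀ row ∈ header_rows.dropLast, (header_rows.headD []).length ≤ row.length

instance (header_rows : List (List String)) : Decidable (Pre_compute_colspan_spans header_rows) := by
  unfold Pre_compute_colspan_spans; infer_instance

def pvWitness_compute_colspan_spans : List (List String) :=
  [["2026 plan", "2026 plan"], ["Q1", "Q2"]]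

def Spec_compute_colspan_spans (header_rows : List (List String)) (out : List (List Int)) : Prop := out = compute_colspan_spans_alt header_rows
instance (header_rows : List (List String)) (out : List (List Int)) : Decidable (Spec_compute_colspan_spans header_rows out) := by unfold Spec_compute_colspan_spans; infer_instance

-- ===== CLAIM (what is proved, stated in full; the proofs are below) =====
def Claim_equal_compute_colspan_spans : Prop := ∀ (header_rows : List (List String)), Dom_compute_colspan_spans header_rows → Pre_compute_colspan_spans header_rows → Spec_compute_colspan_spans header_rows (compute_colspan_spans header_rows)

-- ===== LEMMAS AND PROOFS =====

-- the run-scan loop of A, re-expressed as B's boundary fold (proof-side only)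
def stepD (hr : List (List String)) (s : Nat) (st : List Int × Nat) (j : Nat) : List Int × Nat :=
  if pathA hr s (j + 1) ≠ pathA hr s j then (st.1.set st.2 (((j + 1) - st.2 : Nat) : Int), j + 1) else st

def tailRow (hr : List (List String)) (s n j : Nat) (acc : List Int) : List Int :=
  let st := (List.range' j (n - 1 - j)).foldl (stepD hr s) (acc, j)
  st.1.set st.2 ((n - st.2 : Nat) : Int)

lemma runEndA_le (hr : List (List String)) (s n : Nat) (pj : List String) (k : Nat)
    (h : k ≤ n) : runEndA hr s n pj k ≤ n := by
  rw [runEndA]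
  split_ifs with h1 h2
  · exact Nat.le_of_lt h1
  · exact runEndA_le hr s n pj (k + 1) h1
  · exact h
termination_by n - k
decreasing_by omega

lemma runEndA_run (hr : List (List String)) (s n : Nat) (pj : List String) (k t : Nat)
    (h1 : k ≤ t) (h2 : t < runEndA hr s n pj k) : pathA hr s t = pj := by
  rw [runEndA] at h2
  split_ifs at h2 with hk hd
  · omega
  · rcases Nat.eq_or_lt_of_le h1 with rfl | hlt
    · exact not_not.mp hd
    · exact runEndA_run hr s n pj (k + 1) t hlt h2
  · omega
termination_by n - k
decreasing_by omega

lemma runEndA_stop (hr : List (List String)) (s n : Nat) (pj : List String) (k : Nat)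
    (h : runEndA hr s n pj k < n) : pathA hr s (runEndA hr s n pj k) ≠ pj := by
  rw [runEndA] at h ⊢
  split_ifs at h ⊢ with hk hd
  · exact hd
  · exact runEndA_stop hr s n pj (k + 1) h
  · omega
termination_by n - k
decreasing_by omega

lemma fdLoop_eq_before (hr : List (List String)) (j m r0 t : Nat)
    (h1 : r0 ≤ t) (h2 : t < fdLoop hr j m r0) (h3 : t < m) :
    pvCell hr t j = pvCell hr t (j + 1) := by
  rw [fdLoop] at h2
  split_ifs at h2 with hr' hd
  · omega
  · rcases Nat.eq_or_lt_of_le h1 with rfl | hlt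
    · exact not_not.mp hd
    · exact fdLoop_eq_before hr j m (r0 + 1) t hlt h2 h3
  · omega
termination_by m - r0
decreasing_by omega

lemma fdLoop_diff (hr : List (List String)) (j m r0 : Nat)
    (h : fdLoop hr j m r0 < m) :
    pvCell hr (fdLoop hr j m r0) j ≠ pvCell hr (fdLoop hr j m r0) (j + 1) := by
  rw [fdLoop] at h ⊢
  split_ifs at h ⊢ with hr' hd
  · exact hd
  · exact fdLoop_diff hr j m (r0 + 1) h
  · omega
termination_by m - r0
decreasing_by omega

lemma pathA_eq_iff (hr : List (List String)) (s j k : Nat) :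
    pathA hr s j = pathA hr s k ↔ ∀ r < s, pvCell hr r j = pvCell hr r k := by
  unfold pathA
  constructor
  · intro h r hrs
    have := congrArg (fun l => l.getD r "") h
    simpa [List.getD, List.getElem?_map, List.getElem?_range, hrs] using this
  · intro h
    exact List.map_congr_left (fun r hrm => h r (List.mem_range.mp hrm))

-- boundary condition equivalence: fdLoop … ≤ i ↔ the prefix paths of j and j+1 differ
lemma fd_le_iff (hr : List (List String)) (m i j : Nat) (him : i < m) :
    fdLoop hr j m 0 ≤ i ↔ pathA hr (i + 1) (j + 1) ≠ pathA hr (i + 1) j := by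
  constructor
  · intro h heq
    have hlt : fdLoop hr j m 0 < m := lt_of_le_of_lt h him
    have hd := fdLoop_diff hr j m 0 hlt
    have := (pathA_eq_iff hr (i + 1) (j + 1) j).mp heq (fdLoop hr j m 0) (by omega)
    exact hd this.symm
  · intro hne
    by_contra hgt
    apply hne
    rw [pathA_eq_iff]
    intro r hrs
    exact (fdLoop_eq_before hr j m 0 r (Nat.zero_le r) (by omega) (by omega)).symm
-- note: hrs : r < i + 1 so r ≤ i < fdLoop (from ¬ ≤) and r < m

lemma foldl_stepD_noop (hr : List (List String)) (s : Nat) (l : List Nat)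
    (st : List Int × Nat) (h : ∀ m ∈ l, pathA hr s (m + 1) = pathA hr s m) :
    l.foldl (stepD hr s) st = st := by
  induction l generalizing st with
  | nil => rfl
  | cons x xs ih =>
    have hx := h x List.mem_cons_self
    simp only [List.foldl_cons, stepD, hx, ne_eq, not_true_eq_false, if_neg, not_false_eq_true]
    exact ih st (fun m hm => h m (List.mem_cons_of_mem x hm))

-- a zero-write into a position that is already zero (or out of range) is a no-op
lemma set_zero_noop (acc : List Int) (k : Nat) (h : acc.getD k 0 = 0) :
    acc.set k 0 = acc := by
  apply List.ext_getElem?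
  intro t
  by_cases hk : k = t
  · subst hk
    by_cases hl : k < acc.length
    · rw [List.getElem?_set_self hl, List.getElem?_eq_getElem hl]
      rw [List.getD_eq_getElem acc 0 hl] at h
      rw [h]
    · have hle : acc.length ≤ k := Nat.le_of_not_lt hl
      rw [List.getElem?_eq_none (by simpa using hle), List.getElem?_eq_none hle]
  · rw [List.getElem?_set_ne hk]

lemma foldl_set_zero_noop (l : List Nat) (acc : List Int)
    (h : ∀ k ∈ l, acc.getD k 0 = 0) : l.foldl (fun a k => a.set k (0 : Int)) acc = acc := by
  induction l with
  | nil => rfl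
  | cons x xs ih =>
    have hx := set_zero_noop acc x (h x List.mem_cons_self)
    simp only [List.foldl_cons, hx]
    exact ih (fun k hk => h k (List.mem_cons_of_mem x hk))

-- KEY: A's anchor-jumping run scan equals the left-to-right boundary fold
lemma buildRowA_eq_tailRow (hr : List (List String)) (s n j : Nat) (acc : List Int)
    (hj : j < n) (hacc : ∀ k, j ≤ k → acc.getD k 0 = 0) :
    buildRowA hr s n j acc = tailRow hr s n j acc := by
  have hge : j + 1 ≤ runEndA hr s n (pathA hr s j) (j + 1) := runEndA_ge hr s n _ (j + 1)
  have hle : runEndA hr s n (pathA hr s j) (j + 1) ≤ n := runEndA_le hr s n _ (j + 1) hj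
  set re := runEndA hr s n (pathA hr s j) (j + 1) with hre
  have hrun : ∀ t, j ≤ t → t < re → pathA hr s t = pathA hr s j := by
    intro t h1 h2
    rcases Nat.eq_or_lt_of_le h1 with rfl | hlt
    · rfl
    · exact runEndA_run hr s n _ (j + 1) t hlt h2
  have hacc1 : ∀ k, j + 1 ≤ k →
      (acc.set j ((re - j : Nat) : Int)).getD k 0 = 0 := by
    intro k hk
    rw [List.getD_eq_getElem?_getD, List.getElem?_set_ne (by omega),
      ← List.getD_eq_getElem?_getD]
    exact hacc k (by omega)
  have hzero : (List.range' (j + 1) (re - (j + 1))).foldl (fun a k => a.set k (0 : Int))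
      (acc.set j ((re - j : Nat) : Int)) = acc.set j ((re - j : Nat) : Int) := by
    apply foldl_set_zero_noop
    intro k hk
    have := List.mem_range'_1.mp hk
    exact hacc1 k (by omega)
  have hstep0 : buildRowA hr s n j acc
      = buildRowA hr s n re (acc.set j ((re - j : Nat) : Int)) := by
    rw [buildRowA, dif_pos hj]
    simp only [← hre, hzero]
  rw [hstep0]
  by_cases hc : re < n
  · rw [buildRowA_eq_tailRow hr s n re (acc.set j ((re - j : Nat) : Int)) hc
      (fun k hk => hacc1 k (by omega))]
    unfold tailRow
    have hsplit : List.range' j (n - 1 - j)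
        = (List.range' j (re - 1 - j) ++ [re - 1]) ++ List.range' re (n - 1 - re) := by
      have h1 : n - 1 - j = (re - 1 - j) + ((n - 1 - re) + 1) := by omega
      rw [h1]
      rw [← List.range'_append]
      rw [show j + 1 * (re - 1 - j) = re - 1 from by omega]
      rw [List.range'_succ]
      rw [show re - 1 + 1 = re from by omega]
      simp
    rw [hsplit, List.foldl_append, List.foldl_append]
    have hnoop : (List.range' j (re - 1 - j)).foldl (stepD hr s) (acc, j) = (acc, j) := by
      apply foldl_stepD_noop
      intro m hm
      have hm' := List.mem_range'_1.mp hm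
      rw [hrun m hm'.1 (by omega), hrun (m + 1) (by omega) (by omega)]
    rw [hnoop]
    have hstep : List.foldl (stepD hr s) (acc, j) [re - 1]
        = (acc.set j ((re - j : Nat) : Int), re) := by
      simp only [List.foldl_cons, List.foldl_nil, stepD]
      rw [if_pos]
      · rw [show re - 1 + 1 = re from by omega]
      · rw [show re - 1 + 1 = re from by omega, hrun (re - 1) (by omega) (by omega)]
        exact runEndA_stop hr s n _ (j + 1) hc
    rw [hstep]
  · have hn : re = n := by omega
    rw [buildRowA, dif_neg (by omega)]
    unfold tailRow
    have hnoop : (List.range' j (n - 1 - j)).foldl (stepD hr s) (acc, j) = (acc, j) := by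
      apply foldl_stepD_noop
      intro m hm
      have hm' := List.mem_range'_1.mp hm
      rw [hrun m hm'.1 (by omega), hrun (m + 1) (by omega) (by omega)]
    rw [hnoop]
    show acc.set j ((re - j : Nat) : Int) = acc.set j ((n - j : Nat) : Int)
    rw [hn]
termination_by n - j
decreasing_by omega

-- one non-leaf row: A's row equals B's boundary-scan row
lemma row_eq (hr : List (List String)) (C i : Nat) (hC : 0 < C) (hi : i < hr.length - 1) :
    buildRowA hr (i + 1) C 0 (List.replicate C (0 : Int)) =
    rowB ((List.range (C - 1)).map (fun j => fdLoop hr j (hr.length - 1) 0)) C i := by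
  rw [buildRowA_eq_tailRow hr (i + 1) C 0 _ hC (fun k _ => by
    by_cases hk : k < C
    · exact List.getD_replicate 0 hk
    · rw [List.getD_eq_getElem?_getD, List.getElem?_eq_none (by simpa using hk)]
      rfl)]
  unfold tailRow rowB
  simp only [Nat.sub_zero]
  rw [show List.range' 0 (C - 1) = List.range (C - 1) from List.range_eq_range'.symm]
  have hfold : ∀ (l : List Nat), (∀ j ∈ l, j < C - 1) → ∀ st : List Int × Nat,
      l.foldl (stepD hr (i + 1)) st
      = l.foldl (fun (st : List Int × Nat) j =>
          if ((List.range (C - 1)).map (fun j => fdLoop hr j (hr.length - 1) 0)).getD j 0 ≤ i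
          then (st.1.set st.2 (((j + 1) - st.2 : Nat) : Int), j + 1) else st) st := by
    intro l hl
    induction l with
    | nil => intro st; rfl
    | cons x xs ih =>
      intro st
      have hx : x < C - 1 := hl x List.mem_cons_self
      simp only [List.foldl_cons]
      rw [show (stepD hr (i + 1) st x)
          = (if ((List.range (C - 1)).map (fun j => fdLoop hr j (hr.length - 1) 0)).getD x 0 ≤ i
             then (st.1.set st.2 (((x + 1) - st.2 : Nat) : Int), x + 1) else st) from by
        unfold stepD
        rw [PySem.List.getD_map_range _ _ _ _ hx]
        exact (if_congr (fd_le_iff hr (hr.length - 1) i x hi).symm rfl rfl)]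
      exact ih (fun j hj => hl j (List.mem_cons_of_mem x hj)) _
  rw [hfold (List.range (C - 1)) (by intro j hj; exact List.mem_range.mp hj)]

-- the two ports agree on every input
lemma ports_eq (hr : List (List String)) :
    compute_colspan_spans hr = compute_colspan_spans_alt hr := by
  simp only [compute_colspan_spans, compute_colspan_spans_alt]
  by_cases h0 : hr = []
  · simp [h0]
  · simp only [if_neg h0]
    have hh : (hr.headD []) = hr.getD 0 [] := by
      cases hr with
      | nil => exact absurd rfl h0
      | cons a t => rfl
    rw [hh]
    by_cases hC : (hr.getD 0 []).length = 0
    · rw [if_pos hC, if_pos hC]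
    · rw [if_neg hC, if_neg hC]
      have hRpos : 0 < hr.length := List.length_pos_of_ne_nil h0
      conv_lhs => rw [show hr.length = (hr.length - 1) + 1 from by omega, List.range_succ]
      rw [List.map_append]
      congr 1
      · apply List.map_congr_left
        intro ri hri
        rw [List.mem_range] at hri
        rw [if_neg (by omega)]
        exact row_eq hr ((hr.getD 0 []).length) ri (by omega) hri
      · simp only [List.map_cons, List.map_nil]
        rw [if_pos (by omega)]

-- ===== VERDICT (by name: the statement is the Claim_ definition above) =====
theorem compute_colspan_spans_spec : Claim_equal_compute_colspan_spans := by
  intro hr _ _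
  unfold Spec_compute_colspan_spans
  exact ports_eq hr
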